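-- pv_equiv track=rewrite | github.com/RaulJDlCRUZ/My-Distributed-Systems | Tema 1 Introducción a Python/Python/calcular_notas.py | calc_grades
-- ===== SOURCE A (Python) =====
-- def calc_grades(grades):
--     _pass=0
--     fail=0
--     for grade in grades:
--         if grade >= 5:
--             _pass += 1
--         else:
--             fail += 1
--     return _pass, fail
-- ===== SOURCE B (Python) =====
-- def calc_grades(grades):
--     # Sort a copy, then binary-search the boundary between failing (<5)
--     # and passing (>=5) grades; counts follow from the boundary position.
--     xs = sorted(grades)
--     lo, hi = 0, len(xs)
--     while lo < hi:
--         mid = (lo + hi) // 2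
--         if xs[mid] >= 5:
--             hi = mid
--         else:
--             lo = mid + 1
--     return len(xs) - lo, lo
-- ===== Notes on version B (the rewrite author's own statement) =====
-- stated objective: alternative
-- what changed: B sorts a copy of the grades and binary-searches the first passing position, reading both counts off the boundary index, instead of A's single pass with two branch-driven accumulators.
import Mathlib
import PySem

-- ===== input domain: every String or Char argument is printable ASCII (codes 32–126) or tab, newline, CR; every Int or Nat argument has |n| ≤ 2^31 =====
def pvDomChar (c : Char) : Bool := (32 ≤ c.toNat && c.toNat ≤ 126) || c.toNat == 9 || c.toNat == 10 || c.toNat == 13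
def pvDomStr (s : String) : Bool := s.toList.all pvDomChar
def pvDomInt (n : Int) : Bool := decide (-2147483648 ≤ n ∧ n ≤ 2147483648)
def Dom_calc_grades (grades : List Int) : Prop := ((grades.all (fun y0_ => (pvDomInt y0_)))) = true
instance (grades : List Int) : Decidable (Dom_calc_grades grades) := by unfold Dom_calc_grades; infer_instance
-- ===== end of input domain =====

-- B sorts a copy of the grades and binary-searches the first passing position,
-- reading both counts off that boundary index (objective: alternative algorithm).

-- ===== PORT A =====
-- A: one loop over grades, two branch-driven accumulators (_pass, fail).
def calc_grades (grades : List Int) : Int × Int :=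
  grades.foldl (fun (st : Int × Int) grade =>
    if grade ≥ 5 then (st.1 + 1, st.2) else (st.1, st.2 + 1)) (0, 0)

-- ===== PORT B =====
-- B's while-loop: binary search on the sorted list for the first index holding a
-- grade ≥ 5.  xs[mid] is ported as getD mid 0: the loop keeps lo ≤ mid < hi ≤ len,
-- so the index is always in range and getD agrees with Python's xs[mid] exactly.
def pvBsLoop (xs : List Int) (lo hi : Nat) : Nat :=
  if h : lo < hi then
    let mid := (lo + hi) / 2
    if xs.getD mid 0 ≥ 5 then pvBsLoop xs lo mid else pvBsLoop xs (mid + 1) hi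
  else lo
termination_by hi - lo
decreasing_by all_goals omega

def calc_grades_alt (grades : List Int) : Int × Int :=
  let xs := PySem.List.sorted grades (fun x => x) false
  let lo := pvBsLoop xs 0 xs.length
  ((xs.length : Int) - (lo : Int), (lo : Int))

-- ===== PRECONDITION & SPEC =====
def Spec_calc_grades (grades : List Int) (out : Int × Int) : Prop := out = calc_grades_alt grades
instance (grades : List Int) (out : Int × Int) : Decidable (Spec_calc_grades grades out) := by unfold Spec_calc_grades; infer_instance

-- ===== CLAIM (what is proved, stated in full; the proofs are below) =====
def Claim_equal_calc_grades : Prop := ∀ (grades : List Int), Dom_calc_grades grades → Spec_calc_grades grades (calc_grades grades)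

-- ===== LEMMAS AND PROOFS =====

-- A's loop computes the two counts (stated with a shifted accumulator for induction).
theorem pv_foldl_counts (grades : List Int) (p f : Int) :
    grades.foldl (fun (st : Int × Int) grade =>
      if grade ≥ 5 then (st.1 + 1, st.2) else (st.1, st.2 + 1)) (p, f)
    = (p + (grades.countP (fun g => decide (5 ≤ g)) : Int),
       f + (grades.countP (fun g => decide (g < 5)) : Int)) := by
  induction grades generalizing p f with
  | nil => simp
  | cons g t ih =>
    simp only [List.foldl_cons]
    by_cases h : (5 : Int) ≤ g <;>
      · simp [h, ih, not_le.mp, show ¬ g < 5 ↔ 5 ≤ g from not_lt]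
        try constructor
        all_goals omega

-- If the first k elements fail (< 5) and all later ones pass, the failing count is k.
theorem pv_countP_boundary (xs : List Int) (k : Nat) (hk : k ≤ xs.length)
    (hlow : ∀ i, i < k → xs.getD i 0 < 5)
    (hhigh : ∀ i, k ≤ i → i < xs.length → 5 ≤ xs.getD i 0) :
    xs.countP (fun g => decide (g < 5)) = k := by
  induction xs generalizing k with
  | nil => simp_all
  | cons a t ih =>
    cases k with
    | zero =>
      have ha : ¬ a < 5 := not_lt.mpr (by simpa using hhigh 0 (Nat.zero_le _) (by simp))
      have ht : t.countP (fun g => decide (g < 5)) = 0 :=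
        ih 0 (Nat.zero_le _) (by omega)
          (fun i _ hi => by simpa using hhigh (i + 1) (Nat.zero_le _) (by simpa using hi))
      simp [ha, ht]
    | succ k' =>
      have ha : a < 5 := by simpa using hlow 0 (Nat.succ_pos _)
      have ht : t.countP (fun g => decide (g < 5)) = k' :=
        ih k' (by simpa using hk)
          (fun i hi => by simpa using hlow (i + 1) (by omega))
          (fun i h1 h2 => by simpa using hhigh (i + 1) (by omega) (by simpa using h2))
      simp [ha, ht]

-- The binary search, on a sorted list with a correct invariant, lands on the failing count.
theorem pv_bsLoop_spec (xs : List Int) (hs : xs.Pairwise (· ≤ ·)) (lo hi : Nat)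
    (hhi : hi ≤ xs.length) (hlh : lo ≤ hi)
    (hlow : ∀ i, i < lo → xs.getD i 0 < 5)
    (hhigh : ∀ i, hi ≤ i → i < xs.length → 5 ≤ xs.getD i 0) :
    pvBsLoop xs lo hi = xs.countP (fun g => decide (g < 5)) := by
  have hpw : ∀ i j (_ : i < j) (hj : j < xs.length), xs[i]'(by omega) ≤ xs[j] := by
    intro i j hij hj
    exact (List.pairwise_iff_getElem.mp hs) i j (by omega) hj hij
  unfold pvBsLoop
  split
  · next h =>
    simp only []
    set mid := (lo + hi) / 2 with hmid
    have hm1 : lo ≤ mid := by omega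
    have hm2 : mid < hi := by omega
    have hmlen : mid < xs.length := by omega
    have hgd : xs.getD mid 0 = xs[mid] := List.getD_eq_getElem xs 0 hmlen
    split
    · next hge =>
      refine pv_bsLoop_spec xs hs lo mid (by omega) hm1 hlow ?_
      intro i h1 h2
      rw [List.getD_eq_getElem xs 0 h2]
      rcases Nat.eq_or_lt_of_le h1 with rfl | hlt
      · rw [← hgd]; exact hge
      · exact le_trans (by rw [← hgd]; exact hge) (hpw mid i hlt h2)
    · next hge =>
      have hmlt : xs.getD mid 0 < 5 := not_le.mp (by simpa using hge)
      refine pv_bsLoop_spec xs hs (mid + 1) hi hhi (by omega) ?_ hhigh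
      intro i hi'
      have h2 : i < xs.length := by omega
      rw [List.getD_eq_getElem xs 0 h2]
      rcases Nat.lt_succ_iff_lt_or_eq.mp hi' with hlt | rfl
      · exact lt_of_le_of_lt (hpw i mid hlt hmlen) (by rw [← hgd]; exact hmlt)
      · rw [← hgd]; exact hmlt
  · next h =>
    have : lo = hi := by omega
    subst this
    exact (pv_countP_boundary xs lo hhi hlow hhigh).symm
termination_by hi - lo
decreasing_by all_goals omega

theorem pv_count_split (grades : List Int) :
    grades.countP (fun g => decide (5 ≤ g)) + grades.countP (fun g => decide (g < 5))
      = grades.length := by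
  induction grades with
  | nil => simp
  | cons g t ih =>
    by_cases h : (5 : Int) ≤ g <;>
      simp [h, not_le.mp, show ¬ g < 5 ↔ 5 ≤ g from not_lt] <;> omega

-- ===== VERDICT (by name: the statement is the Claim_ definition above) =====
theorem calc_grades_spec : Claim_equal_calc_grades := by
  intro grades _
  unfold Spec_calc_grades calc_grades calc_grades_alt
  rw [pv_foldl_counts]
  have hperm := PySem.List.sorted_perm grades (fun x => x) false
  have hcount : (PySem.List.sorted grades (fun x => x) false).countP (fun g => decide (g < 5))
      = grades.countP (fun g => decide (g < 5)) := hperm.countP_eq _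
  have hlen : (PySem.List.sorted grades (fun x => x) false).length = grades.length :=
    hperm.length_eq
  have hbs := pv_bsLoop_spec (PySem.List.sorted grades (fun x => x) false)
    (by simpa using PySem.List.sorted_pairwise grades (fun x => x))
    0 (PySem.List.sorted grades (fun x => x) false).length le_rfl (Nat.zero_le _)
    (by omega) (by omega)
  have hsplit := pv_count_split grades
  have hbs2 : pvBsLoop (PySem.List.sorted grades (fun x => x) false) 0 grades.length
      = grades.countP (fun g => decide (g < 5)) := by
    rw [← hlen, hbs, hcount]
  simp only [hlen, Prod.mk.injEq, hbs2]
  constructor <;> omega
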